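-- pv_equiv track=rewrite | github.com/GMainardi/Advent-2023 | day14/b.py | gravity_left
-- ===== SOURCE A (Python) =====
-- def gravity_left(moving_rocks, static_rocks, row):
--
--     floors = [-1] + [x[1] for x in static_rocks if x[0] == row]
--     floors.sort()
--
--     rocks = [x[1] for x in moving_rocks if x[0] == row]
--     rocks.sort()
--
--     floor_idx = 0
--     new_rocks = []
--
--     for rock in rocks:
--
--         while floor_idx+1 < len(floors) and rock > floors[floor_idx+1]:
--             floor_idx += 1
--
--         floors[floor_idx] += 1
--         new_rocks.append((row, floors[floor_idx]))
--
--     return set(new_rocks)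
-- ===== SOURCE B (Python) =====
-- def gravity_left(moving_rocks, static_rocks, row):
--     floors = sorted([-1] + [c for r, c in static_rocks if r == row])
--     counts = [0] * len(floors)
--     for r, c in moving_rocks:
--         if r == row:
--             counts[max(sum(1 for f in floors if f < c) - 1, 0)] += 1
--     out = []
--     for f, c in zip(floors, counts):
--         for k in range(1, c + 1):
--             out.append((row, f + k))
--     return set(out)
-- ===== Notes on version B (the rewrite author's own statement) =====
-- stated objective: alternative
-- what changed: A mutates a sorted floors array with a monotone two-pointer over the sorted rocks; B never sorts the rocks and never mutates: it classifies each rock to its wall segment by counting smaller floor values, accumulates a per-segment counter array, and then emits each segment's stacked positions arithmetically.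
import Mathlib
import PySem

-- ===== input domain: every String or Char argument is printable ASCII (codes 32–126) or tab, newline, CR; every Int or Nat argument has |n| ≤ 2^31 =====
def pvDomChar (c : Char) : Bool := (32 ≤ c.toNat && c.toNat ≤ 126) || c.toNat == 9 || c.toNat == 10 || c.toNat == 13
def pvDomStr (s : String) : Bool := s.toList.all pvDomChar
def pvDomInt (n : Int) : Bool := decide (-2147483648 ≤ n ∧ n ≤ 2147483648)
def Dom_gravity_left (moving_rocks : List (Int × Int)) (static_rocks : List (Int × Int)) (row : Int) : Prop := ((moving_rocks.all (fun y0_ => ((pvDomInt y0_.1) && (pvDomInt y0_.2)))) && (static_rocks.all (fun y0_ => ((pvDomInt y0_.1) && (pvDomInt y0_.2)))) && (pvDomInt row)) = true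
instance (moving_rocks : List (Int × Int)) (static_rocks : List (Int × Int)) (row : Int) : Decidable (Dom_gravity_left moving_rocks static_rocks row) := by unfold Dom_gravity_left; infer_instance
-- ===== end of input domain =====

-- B replaces A's mutate-a-sorted-array two-pointer stacking by a sort-free per-segment
-- counter plus arithmetic generation of the stacked positions (objective: alternative).

-- ===== PORT A =====
-- the 'while floor_idx+1 < len(floors) and rock > floors[floor_idx+1]' loop
def pvAdvance (floors : List Int) (rock : Int) (idx : Nat) : Nat :=
  if h : idx + 1 < floors.length ∧ floors.getD (idx + 1) 0 < rock then
    pvAdvance floors rock (idx + 1)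
  else idx
termination_by floors.length - idx
decreasing_by omega

-- the 'for rock in rocks' loop; floors.getD is exact: floor_idx stays < len(floors)
def pvGoA (row : Int) : List Int → List Int → Nat → List (Int × Int) → List (Int × Int)
  | [], _, _, acc => acc
  | rock :: rs, floors, idx, acc =>
    pvGoA row rs
      (floors.set (pvAdvance floors rock idx) (floors.getD (pvAdvance floors rock idx) 0 + 1))
      (pvAdvance floors rock idx)
      (acc ++ [(row, floors.getD (pvAdvance floors rock idx) 0 + 1)])

def gravity_left (moving_rocks : List (Int × Int)) (static_rocks : List (Int × Int)) (row : Int) : List (Int × Int) :=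
  let floors := PySem.List.sorted ((-1 : Int) :: (static_rocks.filter (fun x => x.1 == row)).map (fun x => x.2)) (fun x => x) false
  let rocks := PySem.List.sorted ((moving_rocks.filter (fun x => x.1 == row)).map (fun x => x.2)) (fun x => x) false
  PySem.Set.ofList (pvGoA row rocks floors 0 [])

-- ===== PORT B =====
-- 'max(sum(1 for f in floors if f < c) - 1, 0)': Nat subtraction is exactly that max
def pvSeg (floors : List Int) (c : Int) : Nat :=
  floors.countP (fun f => decide (f < c)) - 1

def gravity_left_alt (moving_rocks : List (Int × Int)) (static_rocks : List (Int × Int)) (row : Int) : List (Int × Int) :=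
  let floors := PySem.List.sorted ((-1 : Int) :: (static_rocks.filter (fun x => x.1 == row)).map (fun x => x.2)) (fun x => x) false
  let counts := moving_rocks.foldl
    (fun cs x => if x.1 == row then cs.set (pvSeg floors x.2) (cs.getD (pvSeg floors x.2) 0 + 1) else cs)
    (List.replicate floors.length (0 : Int))
  let out := (floors.zip counts).foldl
    (fun acc fc => acc ++ (PySem.List.pyRange 1 (fc.2 + 1) 1).map (fun k => (row, fc.1 + k))) []
  PySem.Set.ofList out

-- ===== PRECONDITION & SPEC =====
def Spec_gravity_left (moving_rocks : List (Int × Int)) (static_rocks : List (Int × Int)) (row : Int) (out : List (Int × Int)) : Prop := out = gravity_left_alt moving_rocks static_rocks row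
instance (moving_rocks : List (Int × Int)) (static_rocks : List (Int × Int)) (row : Int) (out : List (Int × Int)) : Decidable (Spec_gravity_left moving_rocks static_rocks row out) := by unfold Spec_gravity_left; infer_instance

-- ===== CLAIM (what is proved, stated in full; the proofs are below) =====
def Claim_equal_gravity_left : Prop := ∀ (moving_rocks : List (Int × Int)) (static_rocks : List (Int × Int)) (row : Int), Dom_gravity_left moving_rocks static_rocks row → Spec_gravity_left moving_rocks static_rocks row (gravity_left moving_rocks static_rocks row)

-- ===== LEMMAS AND PROOFS =====

-- number of rocks of rs that land in segment i
def pvCnt (F : List Int) (rs : List Int) (i : Nat) : Nat :=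
  rs.countP (fun r => decide (pvSeg F r = i))

-- the per-segment expansion of (left wall, stacked count) pairs
def pvExpand (row : Int) (ps : List (Int × Int)) : List (Int × Int) :=
  ps.flatMap (fun fc => (PySem.List.pyRange 1 (fc.2 + 1) 1).map (fun k => (row, fc.1 + k)))

-- the (wall, count) pairs for segments j, j+1, …
def pvPairs (F : List Int) (rs : List Int) (j : Nat) : List (Int × Int) :=
  (List.range (F.length - j)).map (fun t => (F.getD (j + t) 0, (pvCnt F rs (j + t) : Int)))

lemma pvSeg_lt (F : List Int) (c : Int) (h : 0 < F.length) : pvSeg F c < F.length := by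
  have := List.countP_le_length (l := F) (p := fun f => decide (f < c))
  unfold pvSeg; omega

lemma pvSeg_mono (F : List Int) {r r' : Int} (h : r ≤ r') : pvSeg F r ≤ pvSeg F r' := by
  have : F.countP (fun f => decide (f < r)) ≤ F.countP (fun f => decide (f < r')) := by
    apply List.countP_mono_left
    intro a _ ha
    simp only [decide_eq_true_eq] at *
    omega
  unfold pvSeg; omega

lemma countP_prefix (r : Int) : ∀ (F : List Int), F.Pairwise (· ≤ ·) →
    ∀ i, i < F.length → (F.getD i 0 < r ↔ i < F.countP (fun f => decide (f < r))) := by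
  intro F
  induction F with
  | nil => intro _ i hi; simp at hi
  | cons f t ih =>
    intro hF i hi
    obtain ⟨hft, ht⟩ := List.pairwise_cons.mp hF
    match i with
    | 0 =>
      simp only [List.getD_cons_zero, List.countP_cons]
      by_cases hf : f < r
      · simp [hf]
      · have h0 : t.countP (fun g => decide (g < r)) = 0 := by
          rw [List.countP_eq_zero]
          intro a ha
          simp only [decide_eq_true_eq]
          have := hft a ha; omega
        simp [hf, h0]
    | Nat.succ j =>
      simp only [List.getD_cons_succ, List.countP_cons]
      have hj : j < t.length := by simpa using hi
      have hrec := ih ht j hj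
      by_cases hf : f < r
      · simp only [hf, decide_true, if_true]
        rw [hrec]; omega
      · have h0 : t.countP (fun g => decide (g < r)) = 0 := by
          rw [List.countP_eq_zero]
          intro a ha
          simp only [decide_eq_true_eq]
          have := hft a ha; omega
        have hmem : t.getD j 0 ∈ t := by
          rw [List.getD_eq_getElem t 0 hj]
          exact List.getElem_mem hj
        have hge := hft _ hmem
        rw [h0, if_neg (by simp [hf])]
        constructor
        · intro hlt; omega
        · intro hx; omega

lemma advance_eq (F : List Int) (hF : F.Pairwise (· ≤ ·)) (r : Int) (idx : Nat) (floors : List Int)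
    (hlen : floors.length = F.length)
    (hagree : ∀ i, idx < i → floors.getD i 0 = F.getD i 0)
    (hle : idx ≤ pvSeg F r) :
    pvAdvance floors r idx = pvSeg F r := by
  have hcp := List.countP_le_length (l := F) (p := fun f => decide (f < r))
  rw [pvAdvance]
  split
  case isTrue h =>
    obtain ⟨h1, h2⟩ := h
    rw [hagree (idx + 1) (by omega)] at h2
    have hi1 : idx + 1 < F.length := by omega
    have hc := (countP_prefix r F hF (idx + 1) hi1).mp h2
    have hle' : idx + 1 ≤ pvSeg F r := by unfold pvSeg; omega
    exact advance_eq F hF r (idx + 1) floors hlen (fun i hi => hagree i (by omega)) hle'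
  case isFalse h =>
    by_contra hne
    have hlt : idx < pvSeg F r := by omega
    have hn : idx + 1 < F.countP (fun f => decide (f < r)) := by unfold pvSeg at hlt; omega
    have hi1 : idx + 1 < F.length := by omega
    have hlt2 : F.getD (idx + 1) 0 < r := (countP_prefix r F hF (idx + 1) hi1).mpr hn
    exact h ⟨by omega, by rw [hagree (idx + 1) (by omega)]; exact hlt2⟩
termination_by pvSeg F r - idx
decreasing_by omega

lemma expand_zero_head (row f : Int) (ps : List (Int × Int)) :
    pvExpand row ((f, 0) :: ps) = pvExpand row ps := by
  simp [pvExpand, PySem.List.pyRange_one_eq_nil]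

lemma expandInt_succ (row f : Int) (n : Nat) :
    (PySem.List.pyRange 1 ((n : Int) + 1 + 1) 1).map (fun k => (row, f + k)) =
      (row, f + 1) :: (PySem.List.pyRange 1 ((n : Int) + 1) 1).map (fun k => (row, (f + 1) + k)) := by
  rw [PySem.List.pyRange_one, PySem.List.pyRange_one,
      show ((n : Int) + 1 + 1 - 1).toNat = n + 1 from by omega,
      show ((n : Int) + 1 - 1).toNat = n from by omega,
      List.map_map, List.map_map, List.range_succ_eq_map, List.map_cons]
  congr 1
  rw [List.map_map]
  apply List.map_congr_left
  intro k _
  simp only [Function.comp_apply]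
  exact congrArg (Prod.mk row) (by push_cast; ring)

lemma expand_succ_head (row f c : Int) (hc : 0 ≤ c) (ps : List (Int × Int)) :
    pvExpand row ((f, c + 1) :: ps) = (row, f + 1) :: pvExpand row ((f + 1, c) :: ps) := by
  obtain ⟨n, rfl⟩ := Int.eq_ofNat_of_zero_le hc
  simp only [pvExpand, List.flatMap_cons]
  rw [expandInt_succ row f n]
  simp [List.cons_append]

lemma pvPairs_cons (F : List Int) (rs : List Int) (j : Nat) (hj : j < F.length) :
    pvPairs F rs j = (F.getD j 0, (pvCnt F rs j : Int)) :: pvPairs F rs (j + 1) := by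
  unfold pvPairs
  rw [show F.length - j = (F.length - (j + 1)) + 1 from by omega,
      List.range_succ_eq_map, List.map_cons, List.map_map]
  congr 1
  apply List.map_congr_left
  intro t _
  simp only [Function.comp_apply]
  rw [show j + Nat.succ t = j + 1 + t from by omega]

lemma expand_eq_nil (row : Int) (ps : List (Int × Int)) (h : ∀ p ∈ ps, p.2 = 0) :
    pvExpand row ps = [] := by
  induction ps with
  | nil => rfl
  | cons p t ih =>
    rw [pvExpand, List.flatMap_cons]
    rw [h p (by simp)]
    rw [show (0 : Int) + 1 = 1 from by norm_num,
        PySem.List.pyRange_one_eq_nil (by norm_num)]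
    simp only [List.map_nil, List.nil_append]
    exact ih (fun q hq => h q (by simp [hq]))

lemma expand_pairs_nil (row : Int) (F : List Int) (j : Nat) :
    pvExpand row (pvPairs F [] j) = [] := by
  apply expand_eq_nil
  intro p hp
  simp only [pvPairs, List.mem_map, List.mem_range] at hp
  obtain ⟨t, _, hpe⟩ := hp
  rw [← hpe]
  show ((pvCnt F [] (j + t) : Nat) : Int) = 0
  norm_num [pvCnt]

lemma pvCnt_cons_eq (F : List Int) (r : Int) (rs : List Int) (i : Nat) (h : pvSeg F r = i) :
    pvCnt F (r :: rs) i = pvCnt F rs i + 1 := by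
  simp [pvCnt, h]

lemma pvCnt_cons_ne (F : List Int) (r : Int) (rs : List Int) (i : Nat) (h : pvSeg F r ≠ i) :
    pvCnt F (r :: rs) i = pvCnt F rs i := by
  simp [pvCnt, h]

lemma pvPairs_cons_ne (F : List Int) (r : Int) (rs : List Int) (j : Nat) (h : pvSeg F r < j) :
    pvPairs F (r :: rs) j = pvPairs F rs j := by
  unfold pvPairs
  apply List.map_congr_left
  intro t _
  rw [pvCnt_cons_ne F r rs (j + t) (by omega)]

lemma expand_pairs_skip (row : Int) (F : List Int) (xs : List Int) :
    ∀ (n j : Nat), j + n ≤ F.length →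
    (∀ j', j ≤ j' → j' < j + n → pvCnt F xs j' = 0) →
    pvExpand row (pvPairs F xs j) = pvExpand row (pvPairs F xs (j + n)) := by
  intro n
  induction n with
  | zero => intro j _ _; rfl
  | succ n ih =>
    intro j hle hz
    have hj : j < F.length := by omega
    rw [pvPairs_cons F xs j hj, hz j (le_refl j) (by omega)]
    simp only [Nat.cast_zero]
    rw [expand_zero_head]
    rw [show j + (n + 1) = (j + 1) + n from by omega]
    exact ih (j + 1) (by omega) (fun j' h1 h2 => hz j' (by omega) (by omega))

lemma getD_set_same (cs : List Int) (j : Nat) (v : Int) (h : j < cs.length) :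
    (cs.set j v).getD j 0 = v := by
  simp [List.getD, h]

lemma getD_set_other (cs : List Int) (i j : Nat) (v : Int) (h : i ≠ j) :
    (cs.set j v).getD i 0 = cs.getD i 0 := by
  simp [List.getD, List.getElem?_set_ne (by omega : j ≠ i)]

lemma goA_spec (row : Int) (F : List Int) (hF : F.Pairwise (· ≤ ·)) :
    ∀ (rs floors : List Int) (idx : Nat) (acc : List (Int × Int)) (d : Nat),
    rs.Pairwise (· ≤ ·) →
    (∀ r ∈ rs, idx ≤ pvSeg F r) →
    floors.length = F.length →
    idx < F.length →
    (∀ i, idx < i → floors.getD i 0 = F.getD i 0) →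
    floors.getD idx 0 = F.getD idx 0 + (d : Int) →
    pvGoA row rs floors idx acc =
      acc ++ pvExpand row ((F.getD idx 0 + (d : Int), (pvCnt F rs idx : Int)) :: pvPairs F rs (idx + 1)) := by
  intro rs
  induction rs with
  | nil =>
    intro floors idx acc d _ _ _ _ _ _
    rw [show pvCnt F [] idx = 0 from rfl]
    simp only [Nat.cast_zero]
    rw [expand_zero_head, expand_pairs_nil]
    simp [pvGoA]
  | cons rock rs ih =>
    intro floors idx acc d hpw hseg hlen hidx hagree hd
    obtain ⟨hhead, htail⟩ := List.pairwise_cons.mp hpw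
    have h0F : 0 < F.length := by omega
    have hsegr : idx ≤ pvSeg F rock := hseg rock (by simp)
    have hiF : pvSeg F rock < F.length := pvSeg_lt F rock h0F
    rw [pvGoA, advance_eq F hF rock idx floors hlen hagree hsegr]
    by_cases hcase : pvSeg F rock = idx
    · rw [hcase, hd]
      have hIH := ih (floors.set idx (F.getD idx 0 + (d : Int) + 1)) idx
        (acc ++ [(row, F.getD idx 0 + (d : Int) + 1)]) (d + 1) htail
        (fun r hr => hseg r (List.mem_cons_of_mem rock hr))
        (by rw [List.length_set, hlen]) hidx
        (fun i0 h => by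
          rw [getD_set_other _ _ _ _ (by omega)]
          exact hagree i0 h)
        (by
          rw [getD_set_same _ _ _ (by omega)]
          push_cast
          ring)
      rw [hIH, pvCnt_cons_eq F rock rs idx hcase, pvPairs_cons_ne F rock rs (idx + 1) (by omega)]
      push_cast
      rw [expand_succ_head row (F.getD idx 0 + (d : Int)) ((pvCnt F rs idx : Int)) (Nat.cast_nonneg _)]
      rw [show F.getD idx 0 + ((d : Int) + 1) = F.getD idx 0 + (d : Int) + 1 from by ring]
      rw [List.append_assoc, List.singleton_append]
    · have hlt : idx < pvSeg F rock := by omega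
      have hflr : floors.getD (pvSeg F rock) 0 = F.getD (pvSeg F rock) 0 := hagree _ hlt
      rw [hflr]
      have hsegrs : ∀ r ∈ rs, pvSeg F rock ≤ pvSeg F r :=
        fun r hr => pvSeg_mono F (hhead r hr)
      have hIH := ih (floors.set (pvSeg F rock) (F.getD (pvSeg F rock) 0 + 1)) (pvSeg F rock)
        (acc ++ [(row, F.getD (pvSeg F rock) 0 + 1)]) 1 htail hsegrs
        (by rw [List.length_set, hlen]) hiF
        (fun i0 h => by
          rw [getD_set_other _ _ _ _ (by omega)]
          exact hagree i0 (by omega))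
        (by
          rw [getD_set_same _ _ _ (by omega)]
          norm_num)
      rw [hIH]
      have hcnt0 : pvCnt F (rock :: rs) idx = 0 := by
        rw [pvCnt, List.countP_eq_zero]
        intro a ha
        simp only [decide_eq_true_eq]
        rcases List.mem_cons.mp ha with h | h
        · subst h; omega
        · have := hsegrs a h; omega
      rw [hcnt0]
      simp only [Nat.cast_zero]
      rw [expand_zero_head]
      have hskip := expand_pairs_skip row F (rock :: rs) (pvSeg F rock - (idx + 1)) (idx + 1)
        (by omega)
        (fun j' h1 h2 => by
          rw [pvCnt, List.countP_eq_zero]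
          intro a ha
          simp only [decide_eq_true_eq]
          rcases List.mem_cons.mp ha with h | h
          · subst h; omega
          · have := hsegrs a h; omega)
      rw [show (idx + 1) + (pvSeg F rock - (idx + 1)) = pvSeg F rock from by omega] at hskip
      rw [hskip, pvPairs_cons F (rock :: rs) (pvSeg F rock) hiF,
          pvCnt_cons_eq F rock rs (pvSeg F rock) rfl,
          pvPairs_cons_ne F rock rs (pvSeg F rock + 1) (by omega)]
      push_cast
      rw [expand_succ_head row (F.getD (pvSeg F rock) 0) ((pvCnt F rs (pvSeg F rock) : Int)) (Nat.cast_nonneg _)]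
      rw [List.append_assoc, List.singleton_append]

-- ===== B-side: the counter fold computes pvCnt =====

lemma foldl_filter_map_snd {β : Type} (row : Int) (g : β → Int → β) :
    ∀ (l : List (Int × Int)) (b : β),
    l.foldl (fun acc x => if x.1 == row then g acc x.2 else acc) b =
      ((l.filter (fun x => x.1 == row)).map (fun x => x.2)).foldl g b := by
  intro l
  induction l with
  | nil => intro b; rfl
  | cons x t ih =>
    intro b
    by_cases hx : (x.1 == row) = true
    · rw [List.foldl_cons, List.filter_cons, if_pos hx, if_pos hx, List.map_cons,
          List.foldl_cons, ih]
    · rw [List.foldl_cons, List.filter_cons, if_neg hx, if_neg hx, ih]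

lemma counts_foldl_len (F : List Int) : ∀ (rs : List Int) (cs : List Int),
    (rs.foldl (fun cs r => cs.set (pvSeg F r) (cs.getD (pvSeg F r) 0 + 1)) cs).length = cs.length := by
  intro rs
  induction rs with
  | nil => intro cs; rfl
  | cons r rs ih =>
    intro cs
    rw [List.foldl_cons, ih, List.length_set]

lemma counts_foldl_getD (F : List Int) (h0 : 0 < F.length) :
    ∀ (rs : List Int) (cs : List Int), cs.length = F.length → ∀ i,
    (rs.foldl (fun cs r => cs.set (pvSeg F r) (cs.getD (pvSeg F r) 0 + 1)) cs).getD i 0 =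
      cs.getD i 0 + (pvCnt F rs i : Int) := by
  intro rs
  induction rs with
  | nil => intro cs _ i; simp [pvCnt]
  | cons r rs ih =>
    intro cs hcs i
    rw [List.foldl_cons]
    have hlen' : (cs.set (pvSeg F r) (cs.getD (pvSeg F r) 0 + 1)).length = F.length := by
      rw [List.length_set, hcs]
    rw [ih _ hlen' i]
    have hseglt : pvSeg F r < cs.length := by rw [hcs]; exact pvSeg_lt F r h0
    by_cases hc : pvSeg F r = i
    · subst hc
      rw [getD_set_same cs _ _ hseglt, pvCnt_cons_eq F r rs _ rfl]
      push_cast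
      ring
    · rw [getD_set_other cs i (pvSeg F r) _ (fun hh => hc hh.symm),
          pvCnt_cons_ne F r rs i hc]

lemma getD_replicate_zero (n i : Nat) : (List.replicate n (0 : Int)).getD i 0 = 0 := by
  simp only [List.getD, List.getElem?_replicate]
  split <;> rfl

-- ===== VERDICT (by name: the statement is the Claim_ definition above) =====
theorem gravity_left_spec : Claim_equal_gravity_left := by
  intro m s row _
  unfold Spec_gravity_left
  rw [show gravity_left m s row = PySem.Set.ofList (pvGoA row
      (PySem.List.sorted ((m.filter (fun x => x.1 == row)).map (fun x => x.2)) (fun x => x) false)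
      (PySem.List.sorted ((-1 : Int) :: (s.filter (fun x => x.1 == row)).map (fun x => x.2)) (fun x => x) false)
      0 []) from rfl]
  rw [show gravity_left_alt m s row = PySem.Set.ofList
      (((PySem.List.sorted ((-1 : Int) :: (s.filter (fun x => x.1 == row)).map (fun x => x.2)) (fun x => x) false).zip
        (m.foldl (fun cs x => if x.1 == row then cs.set (pvSeg (PySem.List.sorted ((-1 : Int) :: (s.filter (fun x => x.1 == row)).map (fun x => x.2)) (fun x => x) false) x.2) (cs.getD (pvSeg (PySem.List.sorted ((-1 : Int) :: (s.filter (fun x => x.1 == row)).map (fun x => x.2)) (fun x => x) false) x.2) 0 + 1) else cs)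
          (List.replicate (PySem.List.sorted ((-1 : Int) :: (s.filter (fun x => x.1 == row)).map (fun x => x.2)) (fun x => x) false).length (0 : Int)))).foldl
        (fun acc fc => acc ++ (PySem.List.pyRange 1 (fc.2 + 1) 1).map (fun k => (row, fc.1 + k))) []) from rfl]
  set F := PySem.List.sorted ((-1 : Int) :: (s.filter (fun x => x.1 == row)).map (fun x => x.2)) (fun x => x) false with hFdef
  set rocksU := (m.filter (fun x => x.1 == row)).map (fun x => x.2) with hUdef
  set rocksA := PySem.List.sorted rocksU (fun x => x) false with hAdef
  have hF : F.Pairwise (· ≤ ·) := PySem.List.sorted_pairwise _ _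
  have hFlen : 0 < F.length := by
    rw [hFdef, PySem.List.length_sorted]
    simp
  have hperm : rocksA.Perm rocksU := PySem.List.sorted_perm _ _ _
  have hpwA : rocksA.Pairwise (· ≤ ·) := PySem.List.sorted_pairwise _ _
  have hA := goA_spec row F hF rocksA F 0 [] 0 hpwA (fun r _ => Nat.zero_le _) rfl hFlen
    (fun i _ => rfl) (by simp)
  rw [hA]
  rw [show (m.foldl (fun cs x => if x.1 == row then cs.set (pvSeg F x.2) (cs.getD (pvSeg F x.2) 0 + 1) else cs) (List.replicate F.length (0 : Int)))
        = rocksU.foldl (fun cs r => cs.set (pvSeg F r) (cs.getD (pvSeg F r) 0 + 1)) (List.replicate F.length (0 : Int)) from by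
      rw [hUdef]
      exact foldl_filter_map_snd row
        (fun cs v => cs.set (pvSeg F v) (cs.getD (pvSeg F v) 0 + 1)) m
        (List.replicate F.length (0 : Int))]
  set C := rocksU.foldl (fun cs r => cs.set (pvSeg F r) (cs.getD (pvSeg F r) 0 + 1)) (List.replicate F.length (0 : Int)) with hCdef
  rw [PySem.List.foldl_append_eq_flatMap]
  have hClen : C.length = F.length := by
    rw [hCdef, counts_foldl_len]
    simp
  have hCgetD : ∀ i, C.getD i 0 = (pvCnt F rocksA i : Int) := by
    intro i
    rw [hCdef, counts_foldl_getD F hFlen rocksU _ (by simp) i, getD_replicate_zero]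
    rw [show pvCnt F rocksU i = pvCnt F rocksA i from (List.Perm.countP_eq _ hperm).symm]
    ring
  have hzip : F.zip C = pvPairs F rocksA 0 := by
    apply List.ext_getElem
    · simp [pvPairs, List.length_zip, hClen]
    · intro t h1 h2
      have htF : t < F.length := by
        simp [List.length_zip, hClen] at h1
        omega
      have htC : t < C.length := by omega
      rw [List.getElem_zip]
      simp only [pvPairs, List.getElem_map, List.getElem_range, Nat.zero_add]
      rw [List.getD_eq_getElem F 0 htF]
      rw [show C[t] = C.getD t 0 from (List.getD_eq_getElem C 0 htC).symm, hCgetD t]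
  rw [hzip, pvPairs_cons F rocksA 0 hFlen]
  simp [pvExpand]
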